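-- pv_equiv track=rewrite | github.com/vdinovi/brainf-gen | biogimmickry.py | jump_forward
-- ===== SOURCE A (Python) =====
-- def jump_forward(prog, pc):
--     count = 1
--     i = pc + 1
--     while count:
--         if prog[i] == '[':
--             count += 1
--         elif prog[i] == ']':
--             count -= 1
--         i += 1
--     return i - 1
-- ===== SOURCE B (Python) =====
-- def jump_forward(prog, pc):
--     # Recurse over the nested bracket structure: skip each inner [...] block
--     # with a recursive call instead of maintaining a flat depth counter.
--     i = pc + 1
--     while prog[i] != ']':
--         if prog[i] == '[':
--             i = jump_forward(prog, i) + 1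
--         else:
--             i += 1
--     return i
-- ===== Notes on version B (the rewrite author's own statement) =====
-- stated objective: alternative
-- what changed: Replaces the flat integer depth counter with recursion over the nested bracket structure: each inner '[' block is skipped by a recursive call and the loop only searches the closing bracket of the current level.
import Mathlib
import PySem

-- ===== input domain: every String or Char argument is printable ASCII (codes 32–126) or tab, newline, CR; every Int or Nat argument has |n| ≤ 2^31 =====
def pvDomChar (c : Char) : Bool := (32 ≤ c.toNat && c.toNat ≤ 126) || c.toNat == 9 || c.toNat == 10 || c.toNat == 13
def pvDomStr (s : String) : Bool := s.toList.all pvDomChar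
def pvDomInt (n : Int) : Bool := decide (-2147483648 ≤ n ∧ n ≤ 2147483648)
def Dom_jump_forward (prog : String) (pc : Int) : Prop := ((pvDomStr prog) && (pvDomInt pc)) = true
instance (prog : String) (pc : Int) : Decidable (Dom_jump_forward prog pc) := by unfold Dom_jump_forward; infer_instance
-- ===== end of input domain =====

-- B replaces A's flat depth counter by recursion over the nested bracket structure (objective: alternative decomposition, same cost).

-- ===== PORT A =====
-- A's while loop over state (count, i); fuel is a totality guard only (inside Pre_ the loop runs at most 2*len+1 steps);
-- the fuel-exhausted and IndexError branches are unreachable under Pre_ and return a junk value 0.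
def jfLoop (L : List Char) : Nat → Int → Int → Int
  | 0, _, _ => 0
  | fuel + 1, count, i =>
    if count = 0 then i - 1
    else
      match PySem.List.pyGet? L i with
      | none => 0  -- Python raises IndexError here; excluded by Pre_
      | some ch =>
        jfLoop L fuel (if ch = '[' then count + 1 else if ch = ']' then count - 1 else count) (i + 1)

def jump_forward (prog : String) (pc : Int) : Int :=
  jfLoop prog.toList (2 * prog.toList.length + 2) 1 (pc + 1)

-- ===== PORT B =====
-- B's recursion: starting at pc+1, stop at the ']' of the current level; a '[' is skipped
-- by a recursive self-call (the inner call of 'jump_forward(prog, i)' becomes jfRec at i+1,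
-- then the outer loop resumes at its result + 1). 'none' = fuel exhausted or IndexError,
-- both unreachable under Pre_; jump_forward_alt turns the Option into Python's int result.
def jfRec (s : String) (fuel : Nat) (i : Int) : Option Int :=
  match fuel with
  | 0 => none
  | Nat.succ f =>
    (PySem.Str.pyGet? s i).bind (fun ch =>
      if ch == ']' then some i
      else if ch == '[' then (jfRec s f (i + 1)).bind (fun k => jfRec s f (k + 1))
      else jfRec s f (i + 1))

def jump_forward_alt (prog : String) (pc : Int) : Int :=
  (jfRec prog (2 * prog.toList.length + 2) (pc + 1)).getD 0

-- ===== PRECONDITION & SPEC =====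
-- bracket weight of a character
def pvDelta (c : Char) : Int := if c = '[' then 1 else if c = ']' then -1 else 0

-- sum of bracket weights of the n characters read (Python indexing, possibly negative start) from index s
def pvBal (L : List Char) : Int → Nat → Int
  | _, 0 => 0
  | s, n + 1 => pvDelta ((PySem.List.pyGet? L s).getD ' ') + pvBal L (s + 1) n

-- Exactly the inputs on which A returns (no IndexError): the scan starts in range
-- (Python's negative indices count from the end) and the running depth, started at 1, hits 0 at some read index.
def Pre_jump_forward (prog : String) (pc : Int) : Prop :=
  -(prog.toList.length : Int) ≤ pc + 1 ∧
  ∃ t < ((prog.toList.length : Int) - (pc + 1)).toNat, 1 + pvBal prog.toList (pc + 1) (t + 1) = 0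

instance (prog : String) (pc : Int) : Decidable (Pre_jump_forward prog pc) := by
  unfold Pre_jump_forward; infer_instance

def pvWitness_jump_forward : String × Int := ("[+[-]>]", 0)

def Spec_jump_forward (prog : String) (pc : Int) (out : Int) : Prop := out = jump_forward_alt prog pc
instance (prog : String) (pc : Int) (out : Int) : Decidable (Spec_jump_forward prog pc out) := by unfold Spec_jump_forward; infer_instance

-- ===== CLAIM (what is proved, stated in full; the proofs are below) =====
def Claim_equal_jump_forward : Prop := ∀ (prog : String) (pc : Int), Dom_jump_forward prog pc → Pre_jump_forward prog pc → Spec_jump_forward prog pc (jump_forward prog pc)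

-- ===== LEMMAS AND PROOFS =====

theorem pyGet?_some_lt {L : List Char} {i : Int} {x : Char}
    (h : PySem.List.pyGet? L i = some x) : i < (L.length : Int) := by
  by_contra hge
  have : PySem.List.pyGet? L i = none := by
    rw [PySem.List.pyGet?_eq_none_iff]
    intro hr
    exact hge hr.2
  simp [this] at h

-- the reference scan: first index m ≥ i at which the running count hits 0
def pvScan (L : List Char) (i : Int) (count : Int) : Option Int :=
  match h : PySem.List.pyGet? L i with
  | none => none
  | some ch =>
    if count + pvDelta ch = 0 then some i
    else pvScan L (i + 1) (count + pvDelta ch)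
termination_by ((L.length : Int) - i).toNat
decreasing_by
  have := pyGet?_some_lt h
  omega

theorem pvScan_some {L : List Char} {i : Int} {ch : Char}
    (hg : PySem.List.pyGet? L i = some ch) (c : Int) :
    pvScan L i c = if c + pvDelta ch = 0 then some i else pvScan L (i + 1) (c + pvDelta ch) := by
  rw [pvScan]
  split
  · next h => rw [h] at hg; simp at hg
  · next ch' h => rw [h] at hg; simp at hg; rw [hg]

theorem pvScan_none {L : List Char} {i : Int}
    (hg : PySem.List.pyGet? L i = none) (c : Int) : pvScan L i c = none := by
  rw [pvScan]
  split
  · rfl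
  · next ch' h => rw [h] at hg; simp at hg

theorem pvDelta_cases (c : Char) : pvDelta c = 1 ∨ pvDelta c = -1 ∨ pvDelta c = 0 := by
  unfold pvDelta; split_ifs <;> simp

theorem pvScan_le {L : List Char} {i c m : Int} (h : pvScan L i c = some m) : i ≤ m := by
  fun_induction pvScan L i c with
  | case1 i c hg => simp at h
  | case2 i c ch hg hz => simp at h; omega
  | case3 i c ch hg hz ih => have := ih h; omega

theorem pvScan_lt_len {L : List Char} {i c m : Int} (h : pvScan L i c = some m) :
    m < (L.length : Int) := by
  fun_induction pvScan L i c with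
  | case1 i c hg => simp at h
  | case2 i c ch hg hz => simp at h; subst h; exact pyGet?_some_lt hg
  | case3 i c ch hg hz ih => exact ih h

theorem pvScan_compose {L : List Char} {i a c k m : Int}
    (ha : 1 ≤ a) (hc : 1 ≤ c)
    (h1 : pvScan L i a = some k) (h2 : pvScan L (k + 1) c = some m) :
    pvScan L i (a + c) = some m := by
  fun_induction pvScan L i a generalizing m with
  | case1 i a hg => simp at h1
  | case2 i a ch hg hz =>
    simp at h1; subst h1
    have he : a + c + pvDelta ch = c := by omega
    rw [pvScan_some hg, he, if_neg (by omega : ¬ (c = 0))]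
    exact h2
  | case3 i a ch hg hz ih =>
    have hd := pvDelta_cases ch
    have ha' : 1 ≤ a + pvDelta ch := by rcases hd with h|h|h <;> omega
    rw [pvScan_some hg, if_neg (by omega : ¬ (a + c + pvDelta ch = 0))]
    have he : a + c + pvDelta ch = a + pvDelta ch + c := by ring
    rw [he]
    exact ih ha' h1 h2

theorem pvScan_split {L : List Char} {i c m : Int}
    (hc : 1 ≤ c) (h : pvScan L i (1 + c) = some m) :
    ∃ k, pvScan L i 1 = some k ∧ pvScan L (k + 1) c = some m := by
  have hwf : ∀ n : Nat, ∀ i c m : Int, ((L.length : Int) - i).toNat ≤ n → 1 ≤ c →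
      pvScan L i (1 + c) = some m →
      ∃ k, pvScan L i 1 = some k ∧ pvScan L (k + 1) c = some m := by
    intro n
    induction n with
    | zero =>
      intro i c m hle hc h
      cases hg : PySem.List.pyGet? L i with
      | none => rw [pvScan_none hg] at h; simp at h
      | some ch =>
        have := pyGet?_some_lt hg
        omega
    | succ n ih =>
      intro i c m hle hc h
      cases hg : PySem.List.pyGet? L i with
      | none => rw [pvScan_none hg] at h; simp at h
      | some ch =>
        have hlen := pyGet?_some_lt hg
        have hd := pvDelta_cases ch
        have hnz : ¬ (1 + c + pvDelta ch = 0) := by rcases hd with h'|h'|h' <;> omega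
        rw [pvScan_some hg, if_neg hnz] at h
        rcases hd with hδ | hδ | hδ
        · -- '[': depth goes up; split twice, then recombine with compose
          rw [hδ] at h
          have h' : pvScan L (i + 1) (1 + (c + 1)) = some m := by
            have he : 1 + c + 1 = 1 + (c + 1) := by ring
            rwa [he] at h
          obtain ⟨k, hk1, hk2⟩ := ih (i + 1) (c + 1) m (by omega) (by omega) h'
          have hki : i + 1 ≤ k := pvScan_le hk1
          have hk2' : pvScan L (k + 1) (1 + c) = some m := by
            have he : (c : Int) + 1 = 1 + c := by ring
            rwa [he] at hk2
          obtain ⟨m₂, hm1, hm2⟩ := ih (k + 1) c m (by omega) hc hk2'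
          refine ⟨m₂, ?_, hm2⟩
          rw [pvScan_some hg, hδ, if_neg (by omega : ¬ ((1 : Int) + 1 = 0))]
          exact pvScan_compose (le_refl 1) (le_refl 1) hk1 hm1
        · -- ']': this level closes here
          rw [hδ] at h
          refine ⟨i, ?_, ?_⟩
          · rw [pvScan_some hg, hδ]; simp
          · have he : 1 + c + -1 = c := by ring
            rwa [he] at h
        · -- other char
          rw [hδ] at h
          have h' : pvScan L (i + 1) (1 + c) = some m := by
            have he : 1 + c + 0 = 1 + c := by ring
            rwa [he] at h
          obtain ⟨k, hk1, hk2⟩ := ih (i + 1) c m (by omega) hc h'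
          refine ⟨k, ?_, hk2⟩
          rw [pvScan_some hg, hδ, if_neg (by omega : ¬ ((1 : Int) + 0 = 0))]
          simpa using hk1
  exact hwf ((L.length : Int) - i).toNat i c m (le_refl _) hc h

theorem pvScan_of_bal {L : List Char} {i c : Int}
    (hc : 1 ≤ c) (hlo : -(L.length : Int) ≤ i)
    (h : ∃ t < ((L.length : Int) - i).toNat, c + pvBal L i (t + 1) = 0) :
    ∃ m, pvScan L i c = some m := by
  have hwf : ∀ n : Nat, ∀ i c : Int, ((L.length : Int) - i).toNat ≤ n → 1 ≤ c →
      -(L.length : Int) ≤ i →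
      (∃ t < ((L.length : Int) - i).toNat, c + pvBal L i (t + 1) = 0) →
      ∃ m, pvScan L i c = some m := by
    intro n
    induction n with
    | zero =>
      intro i c hle hc hlo h
      obtain ⟨t, ht, _⟩ := h
      omega
    | succ n ih =>
      intro i c hle hc hlo h
      obtain ⟨t, ht, hbal⟩ := h
      have hi : i < (L.length : Int) := by omega
      obtain ⟨ch, hg⟩ : ∃ ch, PySem.List.pyGet? L i = some ch := by
        cases hg : PySem.List.pyGet? L i with
        | none =>
          rw [PySem.List.pyGet?_eq_none_iff] at hg
          exact absurd ⟨hlo, hi⟩ hg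
        | some ch => exact ⟨ch, rfl⟩
      by_cases hz : c + pvDelta ch = 0
      · exact ⟨i, by rw [pvScan_some hg, if_pos hz]⟩
      · have hd := pvDelta_cases ch
        have hc' : 1 ≤ c + pvDelta ch := by rcases hd with h'|h'|h' <;> omega
        have hbal1 : pvBal L i 1 = pvDelta ch := by simp [pvBal, hg]
        have ht0 : t ≠ 0 := by
          intro h0; rw [h0] at hbal; rw [hbal1] at hbal; omega
        obtain ⟨t', rfl⟩ := Nat.exists_eq_succ_of_ne_zero ht0
        have hbal' : c + pvDelta ch + pvBal L (i + 1) (t' + 1) = 0 := by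
          have he : pvBal L i (t' + 1 + 1) = pvDelta ch + pvBal L (i + 1) (t' + 1) := by
            rw [pvBal, hg]; rfl
          rw [he] at hbal; omega
        obtain ⟨m, hm⟩ := ih (i + 1) (c + pvDelta ch) (by omega) hc' (by omega)
          ⟨t', by omega, hbal'⟩
        exact ⟨m, by rw [pvScan_some hg, if_neg hz]; exact hm⟩
  exact hwf ((L.length : Int) - i).toNat i c (le_refl _) hc hlo h

theorem jfLoop_step (ch : Char) (c : Int) :
    (if ch = '[' then c + 1 else if ch = ']' then c - 1 else c) = c + pvDelta ch := by
  unfold pvDelta; split_ifs <;> ring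

theorem jfLoop_corr {L : List Char} {i c m : Int}
    (hc : 1 ≤ c) (h : pvScan L i c = some m) :
    ∀ fuel : Nat, (m + 2 - i).toNat ≤ fuel → jfLoop L fuel c i = m := by
  fun_induction pvScan L i c generalizing m with
  | case1 i c hg => simp at h
  | case2 i c ch hg hz =>
    simp at h; subst h
    intro fuel hf
    match fuel, (by omega : 2 ≤ fuel) with
    | fuel + 2, _ =>
      rw [jfLoop]
      rw [if_neg (by omega : ¬ (c = 0)), hg]
      simp only [jfLoop_step, hz]
      rw [jfLoop, if_pos rfl]
      omega
  | case3 i c ch hg hz ih =>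
    intro fuel hf
    have him : i ≤ m := by
      have := pvScan_le h; omega
    match fuel, (by omega : 2 ≤ fuel) with
    | fuel + 1, _ =>
      rw [jfLoop]
      rw [if_neg (by omega : ¬ (c = 0)), hg]
      simp only [jfLoop_step]
      have hd := pvDelta_cases ch
      have hc' : 1 ≤ c + pvDelta ch := by rcases hd with h'|h'|h' <;> omega
      exact ih hc' h fuel (by omega)

-- unfolding jfRec one step once the character read is known
theorem jfRec_succ {s : String} {i : Int} {ch : Char}
    (hg : PySem.List.pyGet? s.toList i = some ch) (f : Nat) :
    jfRec s (Nat.succ f) i =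
      (if ch == ']' then some i
       else if ch == '[' then (jfRec s f (i + 1)).bind (fun k => jfRec s f (k + 1))
       else jfRec s f (i + 1)) := by
  rw [jfRec]
  have : PySem.Str.pyGet? s i = some ch := by simpa using hg
  rw [this, Option.bind_some]

theorem jfRec_corr {s : String} :
    ∀ fuel : Nat, ∀ i m : Int, pvScan s.toList i 1 = some m → (m + 2 - i).toNat ≤ fuel →
      jfRec s fuel i = some m := by
  intro fuel
  induction fuel with
  | zero =>
    intro i m h hf
    have := pvScan_le h
    omega
  | succ fuel ih =>
    intro i m h hf
    have him : i ≤ m := pvScan_le h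
    cases hg : PySem.List.pyGet? s.toList i with
    | none => rw [pvScan_none hg] at h; simp at h
    | some ch =>
      rw [jfRec_succ hg]
      have hd := pvDelta_cases ch
      rcases hd with hδ | hδ | hδ
      · -- '[' : recursive skip of the inner block, then continue at its close + 1
        have hch : ch = '[' := by
          unfold pvDelta at hδ; split_ifs at hδ with h1 h2 <;> first | exact h1 | omega
        rw [pvScan_some hg, hδ, if_neg (by omega : ¬ ((1 : Int) + 1 = 0))] at h
        obtain ⟨k, hk1, hk2⟩ := pvScan_split (le_refl 1) h
        have hik : i + 1 ≤ k := pvScan_le hk1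
        have hkm : k + 1 ≤ m := pvScan_le hk2
        have hin : jfRec s fuel (i + 1) = some k := ih (i + 1) k hk1 (by omega)
        simp only [hch, hin, Option.bind_some]
        simp only [show (('[' == ']') = false) by decide, show (('[' == '[') = true) by decide,
          if_false, if_true, Bool.false_eq_true]
        exact ih (k + 1) m hk2 (by omega)
      · -- ']' : close of this level
        have hch : ch = ']' := by
          unfold pvDelta at hδ
          split_ifs at hδ with h1 h2
          all_goals first | exact h2 | omega
        rw [pvScan_some hg, hδ, if_pos (by omega : (1 : Int) + -1 = 0)] at h
        simp at h
        simp only [hch, show ((']' == ']') = true) by decide, if_true, h]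
      · -- other char: step
        have hch1 : (ch == '[') = false := by
          simp only [beq_eq_false_iff_ne, ne_eq]
          intro hc; rw [hc] at hδ; unfold pvDelta at hδ; simp at hδ
        have hch2 : (ch == ']') = false := by
          simp only [beq_eq_false_iff_ne, ne_eq]
          intro hc; rw [hc] at hδ; unfold pvDelta at hδ; simp at hδ
        rw [pvScan_some hg, hδ, if_neg (by omega : ¬ ((1 : Int) + 0 = 0))] at h
        simp only [hch1, hch2, Bool.false_eq_true, if_false]
        have h' : pvScan s.toList (i + 1) 1 = some m := by simpa using h
        exact ih (i + 1) m h' (by omega)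

-- ===== VERDICT (by name: the statement is the Claim_ definition above) =====
theorem jump_forward_spec : Claim_equal_jump_forward := by
  unfold Claim_equal_jump_forward
  intro prog pc _ hpre
  unfold Spec_jump_forward jump_forward jump_forward_alt
  obtain ⟨hlo, hex⟩ := hpre
  obtain ⟨m, hm⟩ := pvScan_of_bal (le_refl 1) hlo hex
  have him : pc + 1 ≤ m := pvScan_le hm
  have hml : m < (prog.toList.length : Int) := pvScan_lt_len hm
  rw [jfLoop_corr (le_refl 1) hm _ (by omega),
      jfRec_corr _ _ _ hm (by omega)]
  rfl
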